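-- pv_equiv track=rewrite | github.com/asryansergey/aoc-2020 | src/day_6/custom_customs.py | sum_of_yes_answers_part_2
-- ===== SOURCE A (Python) =====
-- from typing import List, Optional
--
-- def sum_of_yes_answers_part_2(answers: List[str]) -> int:
--     count_sum = 0
--     for line in answers:
--         set_list = [set(x) for x in line.split(" ")]
--         intersection = set_list[0]
--         for person_answer in set_list[1:]:
--             intersection = intersection & person_answer
--         count_sum += len(intersection)
--     return count_sum
-- ===== SOURCE B (Python) =====
-- from typing import List, Optional
--
-- def sum_of_yes_answers_part_2(answers: List[str]) -> int:
--     total = 0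
--     for line in answers:
--         tokens = line.split(" ")
--         n = len(tokens)
--         counts = {}
--         for tok in tokens:
--             for c in set(tok):
--                 counts[c] = counts.get(c, 0) + 1
--         total += sum(1 for v in counts.values() if v == n)
--     return total
-- ===== Notes on version B (the rewrite author's own statement) =====
-- stated objective: alternative
-- what changed: Replaces the left-fold of pairwise set intersections with a single count-then-threshold pass: one character counter per group (each person contributing each distinct char once) and a tally of chars whose count equals the number of people.
import Mathlib
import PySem

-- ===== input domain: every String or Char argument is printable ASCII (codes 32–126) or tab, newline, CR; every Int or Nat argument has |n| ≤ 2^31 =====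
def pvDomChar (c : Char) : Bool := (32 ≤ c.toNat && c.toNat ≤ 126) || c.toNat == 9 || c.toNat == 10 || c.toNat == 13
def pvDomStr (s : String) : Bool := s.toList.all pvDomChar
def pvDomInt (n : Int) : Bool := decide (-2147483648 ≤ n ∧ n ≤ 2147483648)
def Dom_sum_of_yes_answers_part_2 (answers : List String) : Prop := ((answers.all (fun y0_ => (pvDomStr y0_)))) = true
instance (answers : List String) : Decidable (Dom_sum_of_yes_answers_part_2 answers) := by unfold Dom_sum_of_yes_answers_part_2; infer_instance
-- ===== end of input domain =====

-- B replaces A's left-fold of pairwise set intersections with a per-group character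
-- counter thresholded at the group size (objective: alternative, same cost).

-- ===== PORT A =====
-- line.split(" ") = PySem.Chars.splitOn line.toList [' ']; it is never empty
-- (proved below: splitOn_ne_nil), so Python's set_list[0] never raises and headD [] is exact.
def sum_of_yes_answers_part_2 (answers : List String) : Int :=
  answers.foldl (fun count_sum line =>
    let set_list := (PySem.Chars.splitOn line.toList [' ']).map (fun x => PySem.Set.ofList x)
    let intersection :=
      (set_list.drop 1).foldl (fun intersection person_answer =>
        PySem.Set.inter intersection person_answer) (set_list.headD [])
    count_sum + PySem.Set.len intersection) 0

-- ===== PORT B =====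
def sum_of_yes_answers_part_2_alt (answers : List String) : Int :=
  answers.foldl (fun total line =>
    let tokens := PySem.Chars.splitOn line.toList [' ']
    let n := tokens.length
    let counts := tokens.foldl (fun d tok =>
      (PySem.Set.ofList tok).foldl (fun d c => d.modify c 0 (· + 1)) d)
      (PySem.Dict.empty : PySem.Dict Char Int)
    total + (counts.values.countP (fun v => v == (n : Int)) : Int)) 0

-- ===== PRECONDITION & SPEC =====
def Spec_sum_of_yes_answers_part_2 (answers : List String) (out : Int) : Prop := out = sum_of_yes_answers_part_2_alt answers
instance (answers : List String) (out : Int) : Decidable (Spec_sum_of_yes_answers_part_2 answers out) := by unfold Spec_sum_of_yes_answers_part_2; infer_instance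

-- ===== CLAIM (what is proved, stated in full; the proofs are below) =====
def Claim_equal_sum_of_yes_answers_part_2 : Prop := ∀ (answers : List String), Dom_sum_of_yes_answers_part_2 answers → Spec_sum_of_yes_answers_part_2 answers (sum_of_yes_answers_part_2 answers)

-- ===== LEMMAS AND PROOFS =====

-- A's per-line summand
def aVal (line : String) : Int :=
  PySem.Set.len (((((PySem.Chars.splitOn line.toList [' ']).map (fun x => PySem.Set.ofList x)).drop 1).foldl
    (fun intersection person_answer => PySem.Set.inter intersection person_answer)
    (((PySem.Chars.splitOn line.toList [' ']).map (fun x => PySem.Set.ofList x)).headD [])))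

-- B's per-line summand
def bVal (line : String) : Int :=
  ((((PySem.Chars.splitOn line.toList [' ']).foldl (fun d tok =>
      (PySem.Set.ofList tok).foldl (fun d c => d.modify c 0 (· + 1)) d)
      (PySem.Dict.empty : PySem.Dict Char Int)).values.countP
        (fun v => v == ((PySem.Chars.splitOn line.toList [' ']).length : Int)) : Int))

lemma go_ne_nil (sep : List Char) (fuel : Nat) (l cur : List Char) (acc : List (List Char)) :
    PySem.Chars.splitOn.go sep fuel l cur acc ≠ [] := by
  induction fuel generalizing l cur acc with
  | zero => simp [PySem.Chars.splitOn.go]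
  | succ n ih =>
      cases l with
      | nil => simp [PySem.Chars.splitOn.go]
      | cons c rest =>
          rw [PySem.Chars.splitOn.go]
          split
          · exact ih _ _ _
          · exact ih _ _ _

lemma splitOn_ne_nil (cs sep : List Char) : PySem.Chars.splitOn cs sep ≠ [] :=
  go_ne_nil sep _ cs [] []

-- A's inner fold of intersections keeps exactly the elements of the seed set lying in every later set.
lemma interFold (rest : List (PySem.Set Char)) (s : PySem.Set Char) :
    rest.foldl (fun i p => PySem.Set.inter i p) s
      = s.filter (fun c => rest.all (fun t => t.contains c)) := by
  induction rest generalizing s with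
  | nil => simp
  | cons t r ih =>
      rw [List.foldl_cons, ih]
      show (PySem.Set.inter s t).filter _ = _
      simp only [PySem.Set.inter, List.filter_filter, List.all_cons]
      exact List.filter_congr (fun c _ => by rw [Bool.and_comm])

-- B's nested counting loop is the counter of the flattened per-person char sets.
lemma countsEq (tokens : List (List Char)) :
    tokens.foldl (fun d tok =>
        (PySem.Set.ofList tok).foldl (fun d c => d.modify c 0 (· + 1)) d)
        (PySem.Dict.empty : PySem.Dict Char Int)
      = PySem.Dict.counter (tokens.map (fun t => PySem.Set.ofList t)).flatten := by
  rw [PySem.Dict.counter_eq_foldl, List.foldl_flatten, List.foldl_map]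

-- count of c in the flattened sets = number of tokens whose set contains c
lemma count_flatten_eq_countP (tokens : List (List Char)) (c : Char) :
    ((tokens.map (fun t => PySem.Set.ofList t)).flatten).count c
      = tokens.countP (fun t => c ∈ PySem.Set.ofList t) := by
  rw [List.count_flatten, List.map_map]
  induction tokens with
  | nil => rfl
  | cons t ts ih =>
      rw [List.map_cons, List.sum_cons, ih, List.countP_cons]
      simp only [Function.comp_apply]
      by_cases h : c ∈ PySem.Set.ofList t
      · rw [List.count_eq_one_of_mem (PySem.Set.nodup_ofList t) h]
        simp [h]; omega
      · rw [List.count_eq_zero_of_not_mem h]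
        simp [h]

-- the per-line values of the two programs coincide
lemma line_eq (line : String) : aVal line = bVal line := by
  unfold aVal bVal
  rw [countsEq]
  set tokens := PySem.Chars.splitOn line.toList [' '] with htok
  obtain ⟨t0, ts, hcons⟩ := List.exists_cons_of_ne_nil (htok ▸ splitOn_ne_nil line.toList [' '])
  set flat := (tokens.map (fun t => PySem.Set.ofList t)).flatten with hflat
  -- B side: a filter over the deduplicated flattened characters
  have hvals : (PySem.Dict.counter flat).values
      = (PySem.Set.ofList flat).map (fun k => ((flat.count k : Int))) := by
    simp only [PySem.Dict.values, PySem.Dict.items_counter, List.map_map]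
    rfl
  rw [hvals, List.countP_map]
  have hBpred : (PySem.Set.ofList flat).countP
        ((fun v => v == (tokens.length : Int)) ∘ (fun k => ((flat.count k : Int))))
      = (PySem.Set.ofList flat).countP
        (fun c => tokens.countP (fun t => c ∈ PySem.Set.ofList t) == tokens.length) := by
    apply List.countP_congr
    intro c _
    simp only [Function.comp_apply, beq_iff_eq, Nat.cast_inj]
    rw [hflat, count_flatten_eq_countP]
  rw [hBpred, List.countP_eq_length_filter]
  -- A side: unfold the intersection fold into a filter over the first person's set
  rw [hcons]
  simp only [List.map_cons, List.drop_succ_cons, List.drop_zero, List.headD_cons]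
  rw [interFold]
  -- both sides are lengths of nodup lists with the same membership
  unfold PySem.Set.len
  congr 1
  apply List.Perm.length_eq
  apply (List.perm_ext_iff_of_nodup
    ((PySem.Set.nodup_ofList t0).filter _)
    ((PySem.Set.nodup_ofList flat).filter _)).mpr
  intro c
  constructor
  · intro hc
    rw [List.mem_filter] at hc ⊢
    obtain ⟨hc0, hallb⟩ := hc
    rw [PySem.Set.mem_ofList] at hc0
    have hall : ∀ t ∈ tokens, c ∈ PySem.Set.ofList t := by
      intro t ht
      rw [hcons] at ht
      rcases List.mem_cons.mp ht with rfl | ht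
      · exact (PySem.Set.mem_ofList t c).mpr hc0
      · have := List.all_eq_true.mp hallb (PySem.Set.ofList t) (List.mem_map.mpr ⟨t, ht, rfl⟩)
        simp only [PySem.Set.contains, List.contains_iff_mem] at this
        exact this
    refine ⟨?_, ?_⟩
    · rw [PySem.Set.mem_ofList, hflat, List.mem_flatten]
      refine ⟨PySem.Set.ofList t0, List.mem_map.mpr ⟨t0, ?_, rfl⟩, (PySem.Set.mem_ofList t0 c).mpr hc0⟩
      rw [hcons]; exact List.mem_cons_self ..
    · have hfull : tokens.countP (fun t => decide (c ∈ PySem.Set.ofList t)) = tokens.length :=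
        List.countP_eq_length.mpr (fun t ht => decide_eq_true (hall t ht))
      rw [hcons] at hfull
      exact beq_iff_eq.mpr hfull
  · intro hc
    rw [List.mem_filter] at hc ⊢
    obtain ⟨hcf, hcnt⟩ := hc
    have hcnt' : ∀ t ∈ tokens, c ∈ PySem.Set.ofList t := by
      have h := List.countP_eq_length.mp (beq_iff_eq.mp hcnt)
      intro t ht
      rw [hcons] at ht
      exact of_decide_eq_true (h t ht)
    refine ⟨hcnt' t0 (by rw [hcons]; exact List.mem_cons_self ..), ?_⟩
    apply List.all_eq_true.mpr
    intro s hs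
    obtain ⟨t, ht, rfl⟩ := List.mem_map.mp hs
    simp only [PySem.Set.contains, List.contains_iff_mem]
    exact hcnt' t (by rw [hcons]; exact List.mem_cons_of_mem _ ht)

-- ===== VERDICT (by name: the statement is the Claim_ definition above) =====
theorem sum_of_yes_answers_part_2_spec : Claim_equal_sum_of_yes_answers_part_2 := by
  intro answers _
  show sum_of_yes_answers_part_2 answers = sum_of_yes_answers_part_2_alt answers
  show answers.foldl (fun acc line => acc + aVal line) 0
      = answers.foldl (fun acc line => acc + bVal line) 0
  rw [PySem.List.foldl_add, PySem.List.foldl_add,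
    List.map_congr_left (fun line _ => line_eq line)]
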